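-- pv_equiv track=rewrite | github.com/PechenenkoYara/military-app | website/data_checking.py | is_password_incorrect
-- ===== SOURCE A (Python) =====
-- def is_password_incorrect(password: str):
--     """function to meke sure user's password is valid.
--     It checks if the password is longer, than 7 characters,
--     if it has at least one upper case letter and one sybmol, which is not letter or digit.
--     if the password is valid function returns False
--     """
--     special_characters = "!\"#$%&'()*+,-./:;<=>?@[\\]^_`{|}~"
--
--     if len(password) < 7:
--         return "Password must contain at least 7 characters"
--
--     if ' ' in password:
--         return "There can be no spaces in password"
--
--     if not any(ch.isdigit() for ch in password):
--         return "Password must include at least one digit"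
--
--     if not any(ch.isalpha() for ch in password):
--         return "Password must include at least one letter"
--
--     if not any(ch in special_characters for ch in password):
--         return "Password must include at least one special character"
--
--     if not all(ch.isalnum() or ch in special_characters for ch in password):
--         return "Password can only contain letters, digits and common symbols"
--
--     return False
-- ===== SOURCE B (Python) =====
-- def is_password_incorrect(password: str):
--     """Single-pass variant: one loop over the characters collects all flags,
--     then the messages are emitted in the same priority order as the original."""
--     special_characters = "!\"#$%&'()*+,-./:;<=>?@[\\]^_`{|}~"
--
--     has_space = has_digit = has_alpha = has_special = False
--     all_valid = True
--     for ch in password: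
--         if ch == ' ':
--             has_space = True
--         if ch.isdigit():
--             has_digit = True
--         if ch.isalpha():
--             has_alpha = True
--         if ch in special_characters:
--             has_special = True
--         if not (ch.isalnum() or ch in special_characters):
--             all_valid = False
--
--     if len(password) < 7:
--         return "Password must contain at least 7 characters"
--     if has_space:
--         return "There can be no spaces in password"
--     if not has_digit:
--         return "Password must include at least one digit"
--     if not has_alpha:
--         return "Password must include at least one letter"
--     if not has_special:
--         return "Password must include at least one special character"
--     if not all_valid:
--         return "Password can only contain letters, digits and common symbols"
--     return False
-- ===== Notes on version B (the rewrite author's own statement) =====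
-- stated objective: alternative
-- what changed: B replaces A's five separate scans of the password (substring test plus four any/all generator passes) with a single loop that accumulates has_space/has_digit/has_alpha/has_special/all_valid flags and then emits the same messages in the same priority order.
import Mathlib
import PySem

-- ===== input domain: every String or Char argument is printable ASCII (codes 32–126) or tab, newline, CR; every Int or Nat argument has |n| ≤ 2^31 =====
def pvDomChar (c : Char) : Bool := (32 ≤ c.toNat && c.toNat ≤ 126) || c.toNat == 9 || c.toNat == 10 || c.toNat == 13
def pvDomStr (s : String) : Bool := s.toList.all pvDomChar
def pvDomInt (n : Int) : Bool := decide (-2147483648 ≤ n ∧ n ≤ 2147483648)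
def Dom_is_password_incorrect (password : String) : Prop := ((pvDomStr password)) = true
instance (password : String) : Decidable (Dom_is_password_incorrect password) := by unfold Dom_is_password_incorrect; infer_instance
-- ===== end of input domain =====

-- B makes one pass with accumulated flags instead of A's five separate scans; same messages, same priority order.

-- ===== PORT A =====
def pvSpecials : List Char := "!\"#$%&'()*+,-./:;<=>?@[\\]^_`{|}~".toList

def is_password_incorrect (password : String) : Option String :=
  let cs := password.toList
  if cs.length < 7 then some "Password must contain at least 7 characters"
  else if PySem.Chars.isIn [' '] cs then some "There can be no spaces in password"
  else if !(cs.any PySem.Chars.isdigit) then some "Password must include at least one digit"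
  else if !(cs.any PySem.Chars.isalpha) then some "Password must include at least one letter"
  else if !(cs.any (fun ch => pvSpecials.contains ch)) then some "Password must include at least one special character"
  else if !(cs.all (fun ch => PySem.Chars.isalnum ch || pvSpecials.contains ch)) then some "Password can only contain letters, digits and common symbols"
  else none

-- ===== PORT B =====
-- the loop body of B: update the five flags for one character
def pvStep (st : Bool × Bool × Bool × Bool × Bool) (ch : Char) : Bool × Bool × Bool × Bool × Bool :=
  (st.1 || ch == ' ',
   st.2.1 || PySem.Chars.isdigit ch,
   st.2.2.1 || PySem.Chars.isalpha ch,
   st.2.2.2.1 || pvSpecials.contains ch,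
   st.2.2.2.2 && (PySem.Chars.isalnum ch || pvSpecials.contains ch))

def is_password_incorrect_alt (password : String) : Option String :=
  let cs := password.toList
  let st := cs.foldl pvStep (false, false, false, false, true)
  if cs.length < 7 then some "Password must contain at least 7 characters"
  else if st.1 then some "There can be no spaces in password"
  else if !st.2.1 then some "Password must include at least one digit"
  else if !st.2.2.1 then some "Password must include at least one letter"
  else if !st.2.2.2.1 then some "Password must include at least one special character"
  else if !st.2.2.2.2 then some "Password can only contain letters, digits and common symbols"
  else none

-- ===== PRECONDITION & SPEC =====
def Spec_is_password_incorrect (password : String) (out : Option String) : Prop := out = is_password_incorrect_alt password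
instance (password : String) (out : Option String) : Decidable (Spec_is_password_incorrect password out) := by unfold Spec_is_password_incorrect; infer_instance

-- ===== CLAIM (what is proved, stated in full; the proofs are below) =====
def Claim_equal_is_password_incorrect : Prop := ∀ (password : String), Dom_is_password_incorrect password → Spec_is_password_incorrect password (is_password_incorrect password)

-- ===== LEMMAS AND PROOFS =====

-- B's fold computes exactly the four any-flags and the all-flag A's scans compute
theorem pvStep_foldl (cs : List Char) (a b c d e : Bool) :
    cs.foldl pvStep (a, b, c, d, e) =
      (a || cs.any (fun ch => ch == ' '),
       b || cs.any PySem.Chars.isdigit,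
       c || cs.any PySem.Chars.isalpha,
       d || cs.any (fun ch => pvSpecials.contains ch),
       e && cs.all (fun ch => PySem.Chars.isalnum ch || pvSpecials.contains ch)) := by
  induction cs generalizing a b c d e with
  | nil => simp
  | cons x xs ih =>
    simp [pvStep, ih, Bool.or_assoc, Bool.and_assoc]

-- A's substring test for the one-character string " " is membership of ' '
theorem isIn_space (cs : List Char) :
    PySem.Chars.isIn [' '] cs = cs.any (fun ch => ch == ' ') := by
  by_cases h : ' ' ∈ cs
  · rw [List.any_eq_true.mpr ⟨' ', h, by simp⟩]
    exact (PySem.Chars.isIn_iff_infix _ _).mpr ((List.singleton_infix_iff _ _).mpr h)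
  · rw [List.any_eq_false.mpr (by intro x hx; simp; rintro rfl; exact h hx)]
    apply (PySem.Chars.isIn_eq_false_iff _ _).mpr
    intro hin
    exact h (hin.subset (by simp))

-- ===== VERDICT (by name: the statement is the Claim_ definition above) =====
theorem is_password_incorrect_spec : Claim_equal_is_password_incorrect := by
  intro password _
  unfold Spec_is_password_incorrect is_password_incorrect is_password_incorrect_alt
  simp only [pvStep_foldl, isIn_space, Bool.false_or, Bool.true_and]
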